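-- pv_equiv track=rewrite | github.com/ksahlin/isONcorrect | src/isoncorrect/isONcorrect.py | get_context_offset
-- ===== SOURCE A (Python) =====
-- def get_context_offset(vector, k):
--     nuc_obs = 0
--     if not vector:
--         return 0
--     for offset, n in enumerate(vector):
--         if n != '-':
--             nuc_obs += 1
--
--         if nuc_obs > k:
--             break
--     return offset
-- ===== SOURCE B (Python) =====
-- def get_context_offset(vector, k):
--     if not vector or k < 0:
--         return 0
--     non_gaps = [i for i, n in enumerate(vector) if n != '-']
--     return non_gaps[k] if k < len(non_gaps) else len(vector) - 1
-- ===== Notes on version B (the rewrite author's own statement) =====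
-- stated objective: alternative
-- what changed: Replaces the counting scan with an early break by building the index list of non-gap positions once and answering with a direct lookup (or the len-1 fallback).
import Mathlib
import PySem

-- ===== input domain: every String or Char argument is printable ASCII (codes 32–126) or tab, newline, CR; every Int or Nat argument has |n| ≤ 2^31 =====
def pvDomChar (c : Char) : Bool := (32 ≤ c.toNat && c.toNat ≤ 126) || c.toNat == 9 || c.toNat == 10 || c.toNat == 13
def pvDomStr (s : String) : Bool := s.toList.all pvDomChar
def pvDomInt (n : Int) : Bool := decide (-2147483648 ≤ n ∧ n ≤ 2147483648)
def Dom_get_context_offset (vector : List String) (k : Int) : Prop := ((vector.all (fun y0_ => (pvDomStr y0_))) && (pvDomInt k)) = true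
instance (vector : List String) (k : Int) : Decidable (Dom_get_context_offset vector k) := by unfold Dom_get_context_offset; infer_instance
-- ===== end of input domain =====

-- B builds the index list of non-gap positions once and answers by direct lookup, instead of A's counting scan with an early break (objective: alternative).


-- ===== PORT A =====
-- the for-loop: off is the index of the element currently processed; when the
-- list runs out the loop variable keeps the last index, so the last element
-- returns off itself.
def pvLoopA (k : Int) : List String → Int → Int → Int
  | [], off, _ => off
  | n :: rest, off, nuc =>
    let nuc' := if n ≠ "-" then nuc + 1 else nuc
    if nuc' > k then off
    else match rest with
      | [] => off
      | _ :: _ => pvLoopA k rest (off + 1) nuc'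

def get_context_offset (vector : List String) (k : Int) : Int :=
  if vector = [] then 0
  else pvLoopA k vector 0 0

-- ===== PORT B =====
-- [i for i, n in enumerate(vector) if n != '-'] with a running index
def pvNonGaps : List String → Int → List Int
  | [], _ => []
  | n :: rest, i => if n ≠ "-" then i :: pvNonGaps rest (i + 1) else pvNonGaps rest (i + 1)

def get_context_offset_alt (vector : List String) (k : Int) : Int :=
  if vector = [] ∨ k < 0 then 0
  else
    let nonGaps := pvNonGaps vector 0
    -- non_gaps[k]: the guard ensures 0 ≤ k < len(non_gaps), so pyGet? is some and .getD 0 is exact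
    if k < (nonGaps.length : Int) then (PySem.List.pyGet? nonGaps k).getD 0
    else (vector.length : Int) - 1

-- ===== PRECONDITION & SPEC =====
def Spec_get_context_offset (vector : List String) (k : Int) (out : Int) : Prop := out = get_context_offset_alt vector k
instance (vector : List String) (k : Int) (out : Int) : Decidable (Spec_get_context_offset vector k out) := by unfold Spec_get_context_offset; infer_instance

-- ===== CLAIM (what is proved, stated in full; the proofs are below) =====
def Claim_equal_get_context_offset : Prop := ∀ (vector : List String) (k : Int), Dom_get_context_offset vector k → Spec_get_context_offset vector k (get_context_offset vector k)

-- ===== LEMMAS AND PROOFS =====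

theorem pyGet?_cons_pos (a : Int) (t : List Int) (j : Int) (h0 : 0 < j) :
    PySem.List.pyGet? (a :: t) j = PySem.List.pyGet? t (j - 1) := by
  have h2 : j = ((j - 1).toNat : Int) + 1 := by omega
  rw [h2, PySem.List.pyGet?_cons_succ]
  congr 1
  omega

-- the loop on a nonempty suffix starting at index i with nuc non-gaps already seen
theorem pvLoopA_eq (k : Int) (v : List String) (i nuc : Int) (hv : v ≠ []) (hnk : nuc ≤ k) :
    pvLoopA k v i nuc =
      if k - nuc < ((pvNonGaps v i).length : Int)
      then (PySem.List.pyGet? (pvNonGaps v i) (k - nuc)).getD 0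
      else i + (v.length : Int) - 1 := by
  induction v generalizing i nuc with
  | nil => exact absurd rfl hv
  | cons n rest ih =>
    by_cases hn : n ≠ "-"
    · -- non-gap head
      by_cases hk : nuc + 1 > k
      · -- break here: nuc = k
        have hnuc : nuc = k := by omega
        subst hnuc
        simp only [pvLoopA, pvNonGaps, if_pos hn]
        rw [if_pos (show nuc + 1 > nuc by omega)]
        rw [show nuc - nuc = (0 : Int) by ring]
        rw [if_pos (show (0:Int) < (((i :: pvNonGaps rest (i+1)).length : Nat) : Int) by
          simp only [List.length_cons]; push_cast; omega)]
        rw [PySem.List.pyGet?_zero_cons]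
        rfl
      · have hnk' : nuc + 1 ≤ k := by omega
        simp only [pvLoopA, pvNonGaps, if_pos hn]
        rw [if_neg hk]
        cases rest with
        | nil =>
          simp only [pvNonGaps, List.length_cons, List.length_nil]
          rw [if_neg (show ¬ (k - nuc < (((0+1 : Nat)) : Int)) by push_cast; omega)]
          push_cast; ring
        | cons m ms =>
          rw [ih (i+1) (nuc+1) (by simp) hnk']
          have hkk : k - nuc - 1 = k - (nuc + 1) := by ring
          by_cases hlt : k - (nuc+1) < ((pvNonGaps (m :: ms) (i+1)).length : Int)
          · have hlt' : k - nuc < (((i :: pvNonGaps (m::ms) (i+1)).length : Nat) : Int) := by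
              simp only [List.length_cons] at *; push_cast at *; omega
            rw [if_pos hlt, if_pos hlt']
            rw [pyGet?_cons_pos i _ (k - nuc) (by omega), hkk]
          · have hlt' : ¬ (k - nuc < (((i :: pvNonGaps (m::ms) (i+1)).length : Nat) : Int)) := by
              simp only [List.length_cons] at *; push_cast at *; omega
            rw [if_neg hlt, if_neg hlt']
            simp only [List.length_cons]; push_cast; ring
    · -- gap head
      simp only [pvLoopA, pvNonGaps, if_neg hn]
      rw [if_neg (show ¬ (nuc > k) by omega)]
      cases rest with
      | nil =>
        simp only [pvNonGaps, List.length_nil]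
        rw [if_neg (show ¬ (k - nuc < (((0:Nat)) : Int)) by push_cast; omega)]
        simp only [List.length_cons, List.length_nil]
        push_cast; ring
      | cons m ms =>
        rw [ih (i+1) nuc (by simp) hnk]
        by_cases hlt : k - nuc < ((pvNonGaps (m :: ms) (i+1)).length : Int)
        · rw [if_pos hlt, if_pos hlt]
        · rw [if_neg hlt, if_neg hlt]
          simp only [List.length_cons]; push_cast; ring

theorem pvLoopA_neg (k : Int) (n : String) (rest : List String) (i nuc : Int)
    (h0 : 0 ≤ nuc) (hk : k < 0) : pvLoopA k (n :: rest) i nuc = i := by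
  simp only [pvLoopA]
  by_cases hn : n ≠ "-"
  · rw [if_pos hn, if_pos (by omega : (nuc + 1 > k))]
  · rw [if_neg hn, if_pos (by omega : (nuc > k))]

-- ===== VERDICT (by name: the statement is the Claim_ definition above) =====
theorem get_context_offset_spec : Claim_equal_get_context_offset := by
  intro vector k _
  unfold Spec_get_context_offset get_context_offset get_context_offset_alt
  cases vector with
  | nil => simp
  | cons n rest =>
    have hv : (n :: rest : List String) ≠ [] := by simp
    rw [if_neg hv]
    by_cases hk : k < 0
    · rw [if_pos (Or.inr hk), pvLoopA_neg k n rest 0 0 le_rfl hk]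
    · rw [if_neg (show ¬((n :: rest : List String) = [] ∨ k < 0) by rw [not_or]; exact ⟨hv, hk⟩)]
      rw [pvLoopA_eq k (n :: rest) 0 0 hv (by omega)]
      simp only [sub_zero, zero_add]
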